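-- pv_equiv track=rewrite | github.com/ePPilgrim/Python | AngryChildren2.py | solve
-- ===== SOURCE A (Python) =====
-- def solve(k,w):
--  w.sort()
--  w=[0]+w
--  s=w[:]
--  for i in range(1,len(s)):
--   s[i]+=s[i-1]
--  min=0
--  for i in range(1,k):
--   min+=s[k]-2*s[i]
--  sum = min
--  for i in range(k+1, len(s)):
--   sum = sum - 2*(s[i-1] - s[i-k]) + (k-1)*(w[i]+w[i-k])
--   if sum < min:
--    min = sum
--  return min
-- ===== SOURCE B (Python) =====
-- def solve(k, w):
--     w.sort()
--     if k <= 1: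
--         return 0
--     costs = []
--     for t in range(len(w) - k + 1):
--         c = 0
--         for i in range(k):
--             c += (2 * i - k + 1) * w[t + i]
--         costs.append(c)
--     return min(costs)
-- ===== Notes on version B (the rewrite author's own statement) =====
-- stated objective: simpler
-- what changed: A builds an explicit prefix-sum array and slides the window with an incremental update formula; B sorts and directly recomputes each window's pairwise-difference cost with the closed-form coefficients (2i-k+1)*w[t+i], taking the minimum over window starts.
import Mathlib
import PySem

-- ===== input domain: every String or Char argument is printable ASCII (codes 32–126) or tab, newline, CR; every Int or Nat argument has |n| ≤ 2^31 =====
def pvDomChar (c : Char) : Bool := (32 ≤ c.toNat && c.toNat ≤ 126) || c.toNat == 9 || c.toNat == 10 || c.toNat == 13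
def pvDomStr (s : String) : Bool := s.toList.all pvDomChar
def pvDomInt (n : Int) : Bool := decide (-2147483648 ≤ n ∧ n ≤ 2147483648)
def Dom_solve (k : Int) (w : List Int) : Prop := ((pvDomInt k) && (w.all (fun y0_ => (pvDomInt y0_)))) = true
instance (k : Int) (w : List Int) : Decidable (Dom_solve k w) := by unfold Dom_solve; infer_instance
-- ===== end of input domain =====

-- B replaces A's prefix-sum array + incremental window slide by a direct per-window cost
-- recomputation with the closed-form coefficients (2i-k+1)*w[t+i]. Both A and B sort the
-- argument list in place (w.sort()); the equivalence proved here is about the return value.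

-- ===== PORT A =====
-- helper: the in-place prefix-sum loop 'for i in range(1,len(s)): s[i]+=s[i-1]' on s = w[:]
def aPrefix (w1 : List Int) : List Int :=
  (PySem.List.pyRange 1 (w1.length : Int) 1).foldl
    (fun s i => PySem.List.pySetD s i (PySem.List.pyGetD s i 0 + PySem.List.pyGetD s (i-1) 0)) w1

def solve (k : Int) (w : List Int) : Int :=
  let w1 := 0 :: PySem.List.sorted w (fun x => x) false     -- w.sort(); w = [0]+w
  let s := aPrefix w1
  let mn := (PySem.List.pyRange 1 k 1).foldl
    (fun m i => m + (PySem.List.pyGetD s k 0 - 2 * PySem.List.pyGetD s i 0)) 0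
  let r := (PySem.List.pyRange (k+1) (s.length : Int) 1).foldl
    (fun (p : Int × Int) i =>
      let sm := p.1 - 2 * (PySem.List.pyGetD s (i-1) 0 - PySem.List.pyGetD s (i-k) 0)
                  + (k-1) * (PySem.List.pyGetD w1 i 0 + PySem.List.pyGetD w1 (i-k) 0)
      (sm, if sm < p.2 then sm else p.2)) (mn, mn)
  r.2

-- ===== PORT B =====
def solve_alt (k : Int) (w : List Int) : Int :=
  let v := PySem.List.sorted w (fun x => x) false            -- w.sort()
  if k ≤ 1 then 0
  else
    let costs := (PySem.List.pyRange 0 ((v.length : Int) - k + 1) 1).foldl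
      (fun acc t => acc ++
        [(PySem.List.pyRange 0 k 1).foldl
          (fun c i => c + (2*i - k + 1) * PySem.List.pyGetD v (t+i) 0) 0]) []
    ((PySem.List.min? costs (fun x => x)).getD 0)

-- ===== PRECONDITION & SPEC =====
-- Pre_ excludes exactly the inputs on which A raises IndexError: negative k (the loops index
-- past the end of the list) and 2 ≤ k > len(w) (s[k] is out of range).
def Pre_solve (k : Int) (w : List Int) : Prop := 0 ≤ k ∧ (k ≤ 1 ∨ k ≤ (w.length : Int))
instance (k : Int) (w : List Int) : Decidable (Pre_solve k w) := by unfold Pre_solve; infer_instance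
def pvWitness_solve : Int × List Int := (2, [3, 1, 2])

def Spec_solve (k : Int) (w : List Int) (out : Int) : Prop := out = solve_alt k w
instance (k : Int) (w : List Int) (out : Int) : Decidable (Spec_solve k w out) := by unfold Spec_solve; infer_instance

-- ===== CLAIM (what is proved, stated in full; the proofs are below) =====
def Claim_equal_solve : Prop := ∀ (k : Int) (w : List Int), Dom_solve k w → Pre_solve k w → Spec_solve k w (solve k w)

-- ===== LEMMAS AND PROOFS =====

theorem lsum (n : Nat) (f : Nat → Int) : ((List.range n).map f).sum = ∑ j ∈ Finset.range n, f j := rfl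

-- element access of the sorted list, prefix sums, window cost (abstract versions)
def pacc (a : Nat → Int) : Nat → Int := fun i => ((List.range i).map a).sum
def gcost (a : Nat → Int) (K t : Nat) : Int :=
  ((List.range K).map (fun (j : Nat) => (2*(j:Int) - (K:Int) + 1) * a (t+j))).sum
def av (v : List Int) : Nat → Int := fun j => v.getD j 0
def sList (v : List Int) : List Int := (List.range (v.length+1)).map (pacc (av v))

theorem pacc_fin (a : Nat → Int) (i : Nat) : pacc a i = ∑ j ∈ Finset.range i, a j := rfl
theorem gcost_fin (a : Nat → Int) (K t : Nat) :
    gcost a K t = ∑ j ∈ Finset.range K, (2*(j:Int) - (K:Int) + 1) * a (t+j) := rfl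

theorem sum_ext (s : Finset Nat) (f g : Nat → Int) (h : ∀ j ∈ s, f j = g j) :
    ∑ j ∈ s, f j = ∑ j ∈ s, g j := Finset.sum_congr rfl h

theorem pacc_succ (a : Nat → Int) (i : Nat) : pacc a (i+1) = pacc a i + a i := by
  simp [pacc_fin, Finset.sum_range_succ]

theorem pacc_add (a : Nat → Int) (t m : Nat) :
    pacc a (t+m) = pacc a t + ∑ j ∈ Finset.range m, a (t+j) := by
  induction m with
  | zero => simp
  | succ m ih => rw [show t+(m+1)=(t+m)+1 from rfl, pacc_succ, ih, Finset.sum_range_succ]; ring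

theorem sum_nested (a : Nat → Int) (K : Nat) :
    ∑ i ∈ Finset.range K, pacc a i = ∑ j ∈ Finset.range K, ((K:Int) - 1 - (j:Int)) * a j := by
  induction K with
  | zero => simp
  | succ K ih =>
      rw [Finset.sum_range_succ, ih, Finset.sum_range_succ, pacc_fin]
      rw [show ∑ j ∈ Finset.range K, (((K:Nat):Int) - 1 - (j:Int)) * a j
            = ∑ j ∈ Finset.range K, ((((K+1:Nat):Int) - 1 - (j:Int)) * a j - a j) from
        sum_ext _ _ _ (fun j hj => by push_cast; ring)]
      rw [Finset.sum_sub_distrib]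
      push_cast; ring

theorem gcost_zero (a : Nat → Int) (M : Nat) :
    ∑ j ∈ Finset.range M, (pacc a (M+1) - 2 * pacc a (1+j)) = gcost a (M+1) 0 := by
  have h2 : ∑ j ∈ Finset.range (M+1), pacc a j
      = (∑ j ∈ Finset.range M, pacc a (1+j)) + pacc a 0 := by
    rw [Finset.sum_range_succ' (fun i => pacc a i) M]
    simp [Nat.add_comm]
  have h3 := sum_nested a (M+1)
  have hL : ∑ j ∈ Finset.range M, (pacc a (M+1) - 2 * pacc a (1+j))
      = (M:Int) * pacc a (M+1) - 2 * ∑ j ∈ Finset.range M, pacc a (1+j) := by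
    rw [Finset.sum_sub_distrib, Finset.sum_const, ← Finset.mul_sum, Finset.card_range]
    ring_nf
  have hsum : ∑ j ∈ Finset.range M, pacc a (1+j)
      = ∑ j ∈ Finset.range (M+1), (((M+1:Nat):Int) - 1 - (j:Int)) * a j := by
    rw [← h3, h2]; simp [pacc_fin]
  rw [hL, hsum, gcost_fin, pacc_fin]
  rw [Finset.mul_sum, Finset.mul_sum, ← Finset.sum_sub_distrib]
  refine sum_ext _ _ _ ?_
  intro j hj; push_cast; ring_nf

theorem gcost_step (a : Nat → Int) (K t : Nat) :
    gcost a K (t+1)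
      = gcost a K t - 2 * (pacc a (t+K) - pacc a (t+1)) + ((K:Int)-1) * (a (t+K) + a t) := by
  have hsplit : pacc a (t+K) - pacc a (t+1) = (∑ j ∈ Finset.range K, a (t+j)) - a t := by
    rw [pacc_add a t K, pacc_add a t 1]; simp
  have key : gcost a K (t+1)
      = ∑ j ∈ Finset.range K, (2*((j:Int)+1) - (K:Int) - 1) * a (t+(j+1)) := by
    rw [gcost_fin]; refine sum_ext _ _ _ ?_; intro j hj
    rw [show t+1+j = t+(j+1) from by omega]; ring
  have peel : ∑ j ∈ Finset.range (K+1), (2*(j:Int) - (K:Int) - 1) * a (t+j)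
      = (∑ j ∈ Finset.range K, (2*((j:Int)+1) - (K:Int) - 1) * a (t+(j+1)))
        + (2*(0:Int) - (K:Int) - 1) * a (t+0) := by
    rw [Finset.sum_range_succ' (fun j => (2*(j:Int) - (K:Int) - 1) * a (t+j)) K]
    congr 1
  have peel2 : ∑ j ∈ Finset.range (K+1), (2*(j:Int) - (K:Int) - 1) * a (t+j)
      = (∑ j ∈ Finset.range K, (2*(j:Int) - (K:Int) - 1) * a (t+j))
        + (2*(K:Int) - (K:Int) - 1) * a (t+K) := Finset.sum_range_succ _ _
  have expand : ∑ j ∈ Finset.range K, (2*(j:Int) - (K:Int) - 1) * a (t+j)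
      = gcost a K t - 2 * ∑ j ∈ Finset.range K, a (t+j) := by
    rw [gcost_fin, Finset.mul_sum, ← Finset.sum_sub_distrib]
    refine sum_ext _ _ _ ?_; intro j hj; ring
  rw [key, show (∑ j ∈ Finset.range K, (2*((j:Int)+1) - (K:Int) - 1) * a (t+(j+1)))
      = (∑ j ∈ Finset.range (K+1), (2*(j:Int) - (K:Int) - 1) * a (t+j))
        - (2*(0:Int) - (K:Int) - 1) * a (t+0) from by rw [peel]; ring,
    peel2, expand, hsplit]
  push_cast [Nat.add_zero]; ring

theorem foldl_fixed {α β : Type} (f : α → β → α) (x : α) (l : List β)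
    (h : ∀ i ∈ l, f x i = x) : l.foldl f x = x := by
  induction l with
  | nil => rfl
  | cons b l ih =>
      rw [List.foldl_cons, h b (by simp)]
      exact ih (fun i hi => h i (by simp [hi]))

theorem ifmin (x m : Int) : (if x < m then x else m) = min m x := by omega

theorem sgetD (v : List Int) (i : Nat) (hi : i ≤ v.length) :
    PySem.List.pyGetD (sList v) (i:Int) 0 = pacc (av v) i := by
  rw [PySem.List.pyGetD_natCast, sList]
  rw [List.getD_eq_getElem _ _ (by simp; omega)]
  simp

theorem wGetD (v : List Int) (i : Nat) :
    PySem.List.pyGetD (0 :: v) ((i:Int)+1) 0 = av v i := by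
  rw [show ((i:Int)+1) = (((i+1:Nat)):Int) from by push_cast; ring, PySem.List.pyGetD_natCast]
  simp [av]

theorem sList_length (v : List Int) : (sList v).length = v.length + 1 := by simp [sList]

theorem prefix_loop (v : List Int) (d : Nat) : ∀ (m : Nat), 1 ≤ m → m + d = v.length + 1 →
    (PySem.List.pyRange (m:Int) ((v.length:Int)+1) 1).foldl
      (fun s i => PySem.List.pySetD s i (PySem.List.pyGetD s i 0 + PySem.List.pyGetD s (i-1) 0))
      (((List.range m).map (pacc (av v))) ++ (0 :: v).drop m)
    = sList v := by
  induction d with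
  | zero =>
      intro m hm hlen
      have hm' : m = v.length + 1 := by omega
      subst hm'
      rw [PySem.List.pyRange_one_eq_nil (by push_cast; omega)]
      rw [List.foldl_nil, List.drop_of_length_le (by simp), List.append_nil, sList]
  | succ d ih =>
      intro m hm hlen
      obtain ⟨m0, rfl⟩ : ∃ m0, m = m0 + 1 := ⟨m-1, by omega⟩
      have hmv : m0 < v.length := by omega
      rw [PySem.List.pyRange_one_cons (by push_cast; omega)]
      rw [List.foldl_cons]
      have hdrop : (0 :: v).drop (m0+1) = v[m0] :: v.drop (m0+1) := by
        rw [List.drop_succ_cons, List.drop_eq_getElem_cons hmv]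
      have hA : ((List.range (m0+1)).map (pacc (av v))).length = m0+1 := by simp
      have hget1 : PySem.List.pyGetD (((List.range (m0+1)).map (pacc (av v))) ++ (0 :: v).drop (m0+1)) ((m0+1:Nat):Int) 0
          = v[m0] := by
        rw [PySem.List.pyGetD_natCast, hdrop, List.getD_eq_getElem _ _ (by simp; omega)]
        rw [List.getElem_append_right (by omega)]
        simp [hA]
      have hget2 : PySem.List.pyGetD (((List.range (m0+1)).map (pacc (av v))) ++ (0 :: v).drop (m0+1)) (((m0+1:Nat):Int)-1) 0
          = pacc (av v) m0 := by
        rw [show (((m0+1:Nat)):Int)-1 = ((m0 : Nat) : Int) from by push_cast; ring]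
        rw [PySem.List.pyGetD_natCast, hdrop, List.getD_eq_getElem _ _ (by simp; omega)]
        rw [List.getElem_append_left (by omega)]
        simp
      rw [hget1, hget2]
      have hval : v[m0] + pacc (av v) m0 = pacc (av v) (m0+1) := by
        rw [pacc_succ]
        have : av v m0 = v[m0] := by simp only [av]; exact List.getD_eq_getElem _ _ hmv
        rw [this]; ring
      have hset : PySem.List.pySetD (((List.range (m0+1)).map (pacc (av v))) ++ (0 :: v).drop (m0+1))
            ((m0+1:Nat):Int) (v[m0] + pacc (av v) m0)
          = ((List.range (m0+1+1)).map (pacc (av v))) ++ (0 :: v).drop (m0+1+1) := by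
        rw [PySem.List.pySetD_natCast, List.set_append, if_neg (by omega)]
        rw [hdrop, hA, Nat.sub_self, List.set_cons_zero, hval]
        simp [List.range_succ, List.drop_succ_cons]
      rw [hset]
      rw [show ((m0+1:Nat):Int)+1 = ((m0+1+1 : Nat) : Int) from by push_cast; ring]
      exact ih (m0+1+1) (by omega) (by omega)

theorem prefix_fold (v : List Int) : aPrefix (0 :: v) = sList v := by
  have h0 : ((List.range 1).map (pacc (av v))) ++ (0 :: v).drop 1 = 0 :: v := by
    simp [pacc_fin]
  have := prefix_loop v v.length 1 (by omega) (by omega)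
  rw [h0] at this
  rw [aPrefix, show ((0 :: v).length : Int) = (v.length : Int) + 1 from by simp,
    show (1 : Int) = ((1 : Nat) : Int) from rfl]
  exact this

theorem min0_bridge (v : List Int) (K : Nat) (hK : 2 ≤ K) (hKn : K ≤ v.length) :
    (PySem.List.pyRange 1 (K:Int) 1).foldl
      (fun m i => m + (PySem.List.pyGetD (sList v) (K:Int) 0 - 2 * PySem.List.pyGetD (sList v) i 0)) 0
    = gcost (av v) K 0 := by
  rw [PySem.List.foldl_add (PySem.List.pyRange 1 (K:Int) 1) (fun i => PySem.List.pyGetD (sList v) (K:Int) 0 - 2 * PySem.List.pyGetD (sList v) i 0) 0]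
  rw [PySem.List.pyRange_one, show ((K:Int)-1).toNat = K-1 from by omega, List.map_map]
  rw [lsum, zero_add]
  rw [sum_ext _ _ (fun j => pacc (av v) K - 2 * pacc (av v) (1+j)) ?_]
  · have hM : K-1+1 = K := by omega
    have h := gcost_zero (av v) (K-1)
    rw [hM] at h
    exact h
  · intro j hj
    have hj' : j < K - 1 := Finset.mem_range.mp hj
    simp only [Function.comp_apply]
    rw [show (1:Int) + (j:Int) = ((1+j : Nat) : Int) from by push_cast; ring]
    rw [sgetD v K hKn, sgetD v (1+j) (by omega)]

theorem cost_bridge (v : List Int) (K : Nat) (t : Nat) :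
    (PySem.List.pyRange 0 (K:Int) 1).foldl
      (fun c i => c + (2*i - (K:Int) + 1) * PySem.List.pyGetD v ((t:Int)+i) 0) 0
    = gcost (av v) K t := by
  rw [PySem.List.foldl_add (PySem.List.pyRange 0 (K:Int) 1) (fun i => (2*i - (K:Int) + 1) * PySem.List.pyGetD v ((t:Int)+i) 0) 0]
  rw [PySem.List.pyRange_one, show ((K:Int)-0).toNat = K from by omega, List.map_map]
  rw [lsum, zero_add, gcost_fin]
  refine sum_ext _ _ _ ?_
  intro j hj
  simp only [Function.comp_apply, zero_add]
  rw [show (t:Int) + (j:Int) = ((t+j : Nat) : Int) from by push_cast; ring]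
  rw [PySem.List.pyGetD_natCast]
  rfl

theorem slide (v : List Int) (K : Nat) (hK : 1 ≤ K) (d : Nat) : ∀ (t : Nat) (mn : Int),
    t + K + d = v.length →
    ((PySem.List.pyRange ((t:Int)+(K:Int)+1) ((v.length:Int)+1) 1).foldl
       (fun (p : Int × Int) i =>
         let sm := p.1 - 2 * (PySem.List.pyGetD (sList v) (i-1) 0 - PySem.List.pyGetD (sList v) (i-(K:Int)) 0)
                    + ((K:Int)-1) * (PySem.List.pyGetD (0::v) i 0 + PySem.List.pyGetD (0::v) (i-(K:Int)) 0)
         (sm, if sm < p.2 then sm else p.2))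
       (gcost (av v) K t, mn)).2
    = (List.range d).foldl (fun m j => min m (gcost (av v) K (t+1+j))) mn := by
  induction d with
  | zero =>
      intro t mn hlen
      rw [PySem.List.pyRange_one_eq_nil (by omega)]
      simp
  | succ d ih =>
      intro t mn hlen
      rw [PySem.List.pyRange_one_cons (by omega)]
      rw [List.foldl_cons]
      have hg1 : PySem.List.pyGetD (sList v) (((t:Int)+(K:Int)+1) - 1) 0 = pacc (av v) (t+K) := by
        rw [show ((t:Int)+(K:Int)+1) - 1 = ((t+K : Nat) : Int) from by push_cast; ring]
        exact sgetD v (t+K) (by omega)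
      have hg2 : PySem.List.pyGetD (sList v) (((t:Int)+(K:Int)+1) - (K:Int)) 0 = pacc (av v) (t+1) := by
        rw [show ((t:Int)+(K:Int)+1) - (K:Int) = ((t+1 : Nat) : Int) from by push_cast; ring]
        exact sgetD v (t+1) (by omega)
      have hg3 : PySem.List.pyGetD (0::v) ((t:Int)+(K:Int)+1) 0 = av v (t+K) := by
        rw [show (t:Int)+(K:Int)+1 = (((t+K : Nat)) : Int)+1 from by push_cast; ring]
        exact wGetD v (t+K)
      have hg4 : PySem.List.pyGetD (0::v) (((t:Int)+(K:Int)+1) - (K:Int)) 0 = av v t := by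
        rw [show ((t:Int)+(K:Int)+1) - (K:Int) = ((t : Nat) : Int)+1 from by ring]
        exact wGetD v t
      have hsm : gcost (av v) K t
            - 2 * (pacc (av v) (t+K) - pacc (av v) (t+1))
            + ((K:Int)-1) * (av v (t+K) + av v t) = gcost (av v) K (t+1) :=
        (gcost_step (av v) K t).symm
      have hstep : (let sm := (gcost (av v) K t, mn).1
              - 2 * (PySem.List.pyGetD (sList v) ((t:Int)+(K:Int)+1-1) 0 - PySem.List.pyGetD (sList v) ((t:Int)+(K:Int)+1-(K:Int)) 0)
              + ((K:Int)-1) * (PySem.List.pyGetD (0::v) ((t:Int)+(K:Int)+1) 0 + PySem.List.pyGetD (0::v) ((t:Int)+(K:Int)+1-(K:Int)) 0)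
            ((sm, if sm < (gcost (av v) K t, mn).2 then sm else (gcost (av v) K t, mn).2) : Int × Int))
          = (gcost (av v) K (t+1), min mn (gcost (av v) K (t+1))) := by
        simp only [hg1, hg2, hg3, hg4, ifmin]
        rw [hsm]
      rw [hstep]
      rw [show (t:Int)+(K:Int)+1+1 = ((t+1 : Nat) : Int)+(K:Int)+1 from by push_cast; ring]
      rw [ih (t+1) (min mn (gcost (av v) K (t+1))) (by omega)]
      rw [List.range_succ_eq_map, List.foldl_cons, List.foldl_map]
      have harith : (fun (m : Int) (j : Nat) => min m (gcost (av v) K (t+1+(j+1))))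
          = (fun (m : Int) (j : Nat) => min m (gcost (av v) K (t+1+1+j))) := by
        funext m j
        rw [show t+1+(j+1) = t+1+1+j from by omega]
      simp only [Nat.succ_eq_add_one, Nat.add_zero, harith]

theorem solveA_eq (k : Int) (w : List Int) :
    solve k w
      = ((PySem.List.pyRange (k+1) (((aPrefix (0 :: PySem.List.sorted w (fun x => x) false)).length : Int)) 1).foldl
          (fun (p : Int × Int) i =>
            let sm := p.1 - 2 * (PySem.List.pyGetD (aPrefix (0 :: PySem.List.sorted w (fun x => x) false)) (i-1) 0
                        - PySem.List.pyGetD (aPrefix (0 :: PySem.List.sorted w (fun x => x) false)) (i-k) 0)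
                        + (k-1) * (PySem.List.pyGetD (0 :: PySem.List.sorted w (fun x => x) false) i 0
                        + PySem.List.pyGetD (0 :: PySem.List.sorted w (fun x => x) false) (i-k) 0)
            (sm, if sm < p.2 then sm else p.2))
          ((PySem.List.pyRange 1 k 1).foldl
            (fun m i => m + (PySem.List.pyGetD (aPrefix (0 :: PySem.List.sorted w (fun x => x) false)) k 0
                - 2 * PySem.List.pyGetD (aPrefix (0 :: PySem.List.sorted w (fun x => x) false)) i 0)) 0,
           (PySem.List.pyRange 1 k 1).foldl
            (fun m i => m + (PySem.List.pyGetD (aPrefix (0 :: PySem.List.sorted w (fun x => x) false)) k 0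
                - 2 * PySem.List.pyGetD (aPrefix (0 :: PySem.List.sorted w (fun x => x) false)) i 0)) 0)).2 := rfl

theorem solveB_eq (k : Int) (w : List Int) (h : ¬ k ≤ 1) :
    solve_alt k w
      = ((PySem.List.min?
          ((PySem.List.pyRange 0 (((PySem.List.sorted w (fun x => x) false).length : Int) - k + 1) 1).foldl
            (fun acc t => acc ++
              [(PySem.List.pyRange 0 k 1).foldl
                (fun c i => c + (2*i - k + 1) * PySem.List.pyGetD (PySem.List.sorted w (fun x => x) false) (t+i) 0) 0]) [])
          (fun x => x)).getD 0) := by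
  rw [solve_alt]
  exact if_neg h

-- ===== VERDICT (by name: the statement is the Claim_ definition above) =====
theorem solve_spec : Claim_equal_solve := by
  intro k w _ hpre
  unfold Spec_solve
  obtain ⟨hk0, hcase⟩ := hpre
  rw [solveA_eq]
  rw [prefix_fold (PySem.List.sorted w (fun x => x) false)]
  set v := PySem.List.sorted w (fun x => x) false with hv
  have hvlen : v.length = w.length := PySem.List.length_sorted w (fun x => x) false
  have hslen : ((sList v).length : Int) = (v.length : Int) + 1 := by
    rw [sList_length]; push_cast; ring
  rw [hslen]
  by_cases hk1 : k ≤ 1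
  · -- k = 0 or k = 1; both programs return 0
    rw [solve_alt, if_pos hk1]
    rw [PySem.List.pyRange_one_eq_nil hk1, List.foldl_nil]
    rcases (show k = 0 ∨ k = 1 from by omega) with hk | hk
    · subst hk
      refine Eq.trans (congrArg Prod.snd (foldl_fixed _ ((0:Int),(0:Int)) _ ?_)) rfl
      intro i hi
      obtain ⟨h1, h2⟩ := PySem.List.mem_pyRange_one.mp hi
      obtain ⟨m0, him, hmb⟩ : ∃ m0 : Nat, i = ((m0+1 : Nat) : Int) ∧ m0 + 1 ≤ v.length := by
        refine ⟨(i-1).toNat, by omega, by omega⟩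
      subst him
      have e1 : ((m0+1 : Nat) : Int) - 1 = ((m0 : Nat) : Int) := by push_cast; ring
      simp only [sub_zero, e1, sgetD v m0 (by omega), sgetD v (m0+1) hmb]
      rw [show ((m0+1 : Nat) : Int) = ((m0 : Nat) : Int) + 1 from by push_cast; ring]
      simp only [wGetD v m0]
      have hsm0 : ((0:Int),(0:Int)).1 - 2 * (pacc (av v) m0 - pacc (av v) (m0+1))
          + (0-1) * (av v m0 + av v m0) = 0 := by
        rw [pacc_succ]; ring
      rw [hsm0]
      simp
    · subst hk
      refine Eq.trans (congrArg Prod.snd (foldl_fixed _ ((0:Int),(0:Int)) _ ?_)) rfl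
      intro i hi
      have hsm0 : ((0:Int),(0:Int)).1 - 2 * (PySem.List.pyGetD (sList v) (i-1) 0 - PySem.List.pyGetD (sList v) (i-1) 0)
          + (1-1) * (PySem.List.pyGetD (0::v) i 0 + PySem.List.pyGetD (0::v) (i-1) 0) = 0 := by ring
      rw [hsm0]
      simp
  · -- main case: 2 ≤ k ≤ len(w)
    have hkw : k ≤ (w.length : Int) := by
      rcases hcase with h | h
      · omega
      · exact h
    have hkK : k = ((k.toNat : Nat) : Int) := by omega
    set K := k.toNat with hKdef
    have hK2 : 2 ≤ K := by omega
    have hKn : K ≤ v.length := by omega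
    set d := v.length - K with hd
    rw [solveB_eq k w hk1, ← hv]
    rw [hkK, min0_bridge v K hK2 hKn]
    rw [show ((K:Nat):Int)+1 = ((0 : Nat) : Int)+(K:Int)+1 from by push_cast; ring]
    rw [slide v K (by omega) d 0 (gcost (av v) K 0) (by omega)]
    -- B side
    rw [PySem.List.foldl_append_singleton_eq_map, List.nil_append]
    rw [show (v.length : Int) - ((K:Nat):Int) + 1 = ((d+1 : Nat) : Int) from by push_cast; omega]
    rw [PySem.List.pyRange_zero_natCast (d+1), List.map_map]
    rw [List.map_congr_left (fun (j : Nat) hj => by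
      show _ = gcost (av v) K j
      simp only [Function.comp_apply]
      exact cost_bridge v K j)]
    rw [List.range_succ_eq_map, List.map_cons, PySem.List.min?_id_cons, Option.getD_some]
    rw [List.map_map, List.foldl_map]
    have harith2 : (fun (m : Int) (j : Nat) => min m (gcost (av v) K (0+1+j)))
        = (fun (m : Int) (j : Nat) => min m ((gcost (av v) K ∘ Nat.succ) j)) := by
      funext m j
      simp only [Function.comp_apply]
      rw [show 0+1+j = Nat.succ j from by omega]
    rw [harith2]
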